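-- pv_equiv track=rewrite | github.com/lancelote/advent_of_code | src/year2025/day04a.py | count_accessible
-- ===== SOURCE A (Python) =====
-- SHIFTS = (
--     # dr dc
--     (-1, -1),
--     (-1, 0),
--     (-1, +1),
--     (0, +1),
--     (+1, +1),
--     (+1, 0),
--     (+1, -1),
--     (0, -1),
-- )
--
-- def can_be_removed(r: int, c: int, diagram: list[list[str]]) -> bool:
--     if diagram[r][c] == ".":
--         return False
--
--     n_rows = len(diagram)
--     n_cols = len(diagram[0])
--
--     neighbors = 0
--
--     for dr, dc in SHIFTS:
--         nr = r + dr
--         nc = c + dc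
--
--         if 0 <= nr < n_rows and 0 <= nc < n_cols:
--             if diagram[nr][nc] == "@":
--                 neighbors += 1
--
--     return neighbors < 4
--
-- def count_accessible(diagram: list[list[str]]) -> int:
--     count = 0
--
--     n_rows = len(diagram)
--     n_cols = len(diagram[0])
--
--     for r in range(n_rows):
--         for c in range(n_cols):
--             if can_be_removed(r, c, diagram):
--                 count += 1
--
--     return count
-- ===== SOURCE B (Python) =====
-- def count_accessible(diagram: list[list[str]]) -> int:
--     # separable convolution: per-row 0/1 indicators of "@", then per-row
--     # horizontal 3-window sums built once; the 8-neighbor count at (r, c) is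
--     # above[c] + here[c] + below[c] - ind[r][c].
--     n_cols = len(diagram[0])
--     ind = [[1 if row[c] == "@" else 0 for c in range(n_cols)] for row in diagram]
--     h = [
--         [
--             (s[c - 1] if c > 0 else 0) + s[c] + (s[c + 1] if c + 1 < n_cols else 0)
--             for c in range(n_cols)
--         ]
--         for s in ind
--     ]
--     zeros = [0] * n_cols
--     count = 0
--     for r, row in enumerate(diagram):
--         above = h[r - 1] if r > 0 else zeros
--         here = h[r]
--         below = h[r + 1] if r + 1 < len(diagram) else zeros
--         ind_r = ind[r]
--         for c in range(n_cols):
--             if row[c] != "." and above[c] + here[c] + below[c] - ind_r[c] < 4: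
--                 count += 1
--     return count
-- ===== Notes on version B (the rewrite author's own statement) =====
-- stated objective: faster
-- what changed: A scans the 8 neighbor offsets with bounds checks for every cell; B builds per-row 0/1 '@' indicator lists and per-row horizontal 3-window sums once (separable convolution), so each cell's neighbor count is three row-sum lookups minus the center indicator.
import Mathlib
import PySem

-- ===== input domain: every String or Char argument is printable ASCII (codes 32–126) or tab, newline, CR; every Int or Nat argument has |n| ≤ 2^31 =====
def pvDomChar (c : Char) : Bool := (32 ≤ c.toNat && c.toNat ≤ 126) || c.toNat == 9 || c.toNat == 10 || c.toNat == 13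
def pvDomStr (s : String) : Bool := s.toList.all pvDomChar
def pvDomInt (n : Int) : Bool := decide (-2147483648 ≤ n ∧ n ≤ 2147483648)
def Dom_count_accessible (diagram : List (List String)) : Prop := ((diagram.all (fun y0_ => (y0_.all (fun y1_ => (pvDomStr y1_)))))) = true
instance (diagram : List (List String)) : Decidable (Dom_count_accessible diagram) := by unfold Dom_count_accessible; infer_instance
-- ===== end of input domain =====

-- B replaces A's per-cell 8-direction bounds-checked scan with per-row 0/1 indicator lists and
-- per-row horizontal 3-window sums built once (a separable convolution), so each cell needs only
-- three row-sum lookups minus the center; objective: faster (measured constant-factor speedup).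

-- ===== PORT A =====
def SHIFTS : List (Int × Int) :=
  [(-1, -1), (-1, 0), (-1, 1), (0, 1), (1, 1), (1, 0), (1, -1), (0, -1)]

-- diagram[r][c]; the defaults are never reached on inputs admitted by Pre_ at the call sites
-- where Python would raise (exact elsewhere).
def pvCell (diagram : List (List String)) (r c : Int) : String :=
  PySem.List.pyGetD (PySem.List.pyGetD diagram r []) c ""

def can_be_removed (r c : Int) (diagram : List (List String)) : Bool :=
  if pvCell diagram r c == "." then false
  else
    let n_rows : Int := diagram.length
    let n_cols : Int := (PySem.List.pyGetD diagram 0 []).length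
    let neighbors : Int := SHIFTS.foldl (fun neighbors dd =>
      let nr := r + dd.1
      let nc := c + dd.2
      if 0 ≤ nr ∧ nr < n_rows ∧ 0 ≤ nc ∧ nc < n_cols then
        (if pvCell diagram nr nc == "@" then neighbors + 1 else neighbors)
      else neighbors) 0
    decide (neighbors < 4)

def count_accessible (diagram : List (List String)) : Int :=
  let n_rows : Int := diagram.length
  let n_cols : Int := (PySem.List.pyGetD diagram 0 []).length
  (PySem.List.pyRange 0 n_rows 1).foldl (fun count r =>
    (PySem.List.pyRange 0 n_cols 1).foldl (fun count c =>
      if can_be_removed r c diagram then count + 1 else count) count) 0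

-- ===== PORT B =====
def count_accessible_alt (diagram : List (List String)) : Int :=
  let n_cols : Int := (PySem.List.pyGetD diagram 0 []).length
  let ind : List (List Int) := diagram.map (fun row =>
    (PySem.List.pyRange 0 n_cols 1).map (fun c =>
      if PySem.List.pyGetD row c "" == "@" then (1 : Int) else 0))
  let h : List (List Int) := ind.map (fun s =>
    (PySem.List.pyRange 0 n_cols 1).map (fun c =>
      (if 0 < c then PySem.List.pyGetD s (c - 1) 0 else 0) +
        PySem.List.pyGetD s c 0 +
        (if c + 1 < n_cols then PySem.List.pyGetD s (c + 1) 0 else 0)))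
  let zeros : List Int := List.replicate n_cols.toNat 0
  (PySem.List.enumerate diagram 0).foldl (fun count p =>
    let r := p.1
    let row := p.2
    let above := if 0 < r then PySem.List.pyGetD h (r - 1) [] else zeros
    let here := PySem.List.pyGetD h r []
    let below := if r + 1 < (diagram.length : Int) then PySem.List.pyGetD h (r + 1) [] else zeros
    let ind_r := PySem.List.pyGetD ind r []
    (PySem.List.pyRange 0 n_cols 1).foldl (fun count c =>
      if PySem.List.pyGetD row c "" ≠ "." ∧
          PySem.List.pyGetD above c 0 + PySem.List.pyGetD here c 0 +
            PySem.List.pyGetD below c 0 - PySem.List.pyGetD ind_r c 0 < 4 then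
        count + 1
      else count) count) 0

-- ===== PRECONDITION & SPEC =====
-- Pre_ excludes exactly the inputs on which Python A raises IndexError: the empty diagram
-- (len(diagram[0])) and diagrams where some row is shorter than the first row.
def Pre_count_accessible (diagram : List (List String)) : Prop :=
  diagram ≠ [] ∧ ∀ row ∈ diagram, (diagram.headD []).length ≤ row.length
instance (diagram : List (List String)) : Decidable (Pre_count_accessible diagram) := by
  unfold Pre_count_accessible; infer_instance

def pvWitness_count_accessible : List (List String) := [["@", "."], ["@", "@"]]

def Spec_count_accessible (diagram : List (List String)) (out : Int) : Prop := out = count_accessible_alt diagram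
instance (diagram : List (List String)) (out : Int) : Decidable (Spec_count_accessible diagram out) := by unfold Spec_count_accessible; infer_instance

-- ===== CLAIM =====
def Claim_equal_count_accessible : Prop := ∀ (diagram : List (List String)), Dom_count_accessible diagram → Pre_count_accessible diagram → Spec_count_accessible diagram (count_accessible diagram)

-- ===== LEMMAS AND PROOFS =====

-- 0/1 indicator of an in-bounds "@" cell (0 outside the grid).
def pvG (d : List (List String)) (r c : Int) : Int :=
  if 0 ≤ r ∧ r < (d.length : Int) ∧ 0 ≤ c ∧ c < ((PySem.List.pyGetD d 0 []).length : Int) then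
    (if pvCell d r c == "@" then 1 else 0)
  else 0

-- horizontal 3-window sum of indicators in row r around column c
def pvH (d : List (List String)) (r c : Int) : Int :=
  pvG d r (c - 1) + pvG d r c + pvG d r (c + 1)

-- the 8 neighbor indicators, in A's SHIFTS order
def pvA8 (d : List (List String)) (r c : Int) : Int :=
  pvG d (r - 1) (c - 1) + pvG d (r - 1) c + pvG d (r - 1) (c + 1) + pvG d r (c + 1) +
    pvG d (r + 1) (c + 1) + pvG d (r + 1) c + pvG d (r + 1) (c - 1) + pvG d r (c - 1)

theorem pvStep (d : List (List String)) (acc nr nc : Int) :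
    (if 0 ≤ nr ∧ nr < (d.length : Int) ∧ 0 ≤ nc ∧ nc < ((PySem.List.pyGetD d 0 []).length : Int) then
      (if pvCell d nr nc == "@" then acc + 1 else acc)
    else acc) = acc + pvG d nr nc := by
  unfold pvG; split_ifs <;> omega

theorem can_eq (d : List (List String)) (r c : Int) :
    can_be_removed r c d = (!(pvCell d r c == ".") && decide (pvA8 d r c < 4)) := by
  unfold can_be_removed
  simp only [SHIFTS, List.foldl_cons, List.foldl_nil, pvStep]
  by_cases hdot : pvCell d r c == "."
  · simp [hdot]
  · simp only [hdot, Bool.not_false, Bool.true_and]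
    have : pvG d (r + -1) (c + -1) + pvG d (r + -1) c + pvG d (r + -1) (c + 1) + pvG d r (c + 1) +
        pvG d (r + 1) (c + 1) + pvG d (r + 1) c + pvG d (r + 1) (c + -1) + pvG d r (c + -1) =
        pvA8 d r c := by
      unfold pvA8
      have e1 : ∀ x : Int, x + -1 = x - 1 := fun x => by ring
      rw [e1 r, e1 c]
    simp [this]

theorem pv_getD_map {α β : Type} (l : List α) (f : α → β) (k : Nat) (dd : β) (h : k < l.length) :
    PySem.List.pyGetD (List.map f l) ↑k dd = f l[k] := by
  rw [PySem.List.pyGetD_natCast]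
  simp [List.getD_eq_getElem?_getD, h]

theorem zeros_get (m : Nat) (j : Int) : PySem.List.pyGetD (List.replicate m (0:Int)) j 0 = 0 := by
  rcases h : PySem.List.pyGet? (List.replicate m (0:Int)) j with _ | v
  · simp [PySem.List.pyGetD, h]
  · have := PySem.List.mem_of_pyGet?_eq_some (h := h)
    simp [List.eq_of_mem_replicate this] at h ⊢
    simp [PySem.List.pyGetD, h]

theorem s_get (d : List (List String)) (rN : Nat) (hr : rN < d.length) (j : Int) (hj : 0 ≤ j) :
    PySem.List.pyGetD (List.map (fun c => if PySem.List.pyGetD d[rN] c "" == "@" then (1:Int) else 0)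
      (PySem.List.pyRange 0 ((PySem.List.pyGetD d 0 []).length : Int) 1)) j 0 = pvG d ↑rN j := by
  have hcell : pvCell d (↑rN) j = PySem.List.pyGetD d[rN] j "" := by
    unfold pvCell; rw [PySem.List.pyGetD_natCast]; congr 1
    simp [List.getD_eq_getElem?_getD, hr]
  by_cases hlt : j < ((PySem.List.pyGetD d 0 []).length : Int)
  · have hcond : (0 ≤ (rN:Int) ∧ (rN:Int) < (d.length : Int) ∧ 0 ≤ j ∧ j < ((PySem.List.pyGetD d 0 []).length : Int)) :=
      ⟨by positivity, by exact_mod_cast hr, hj, hlt⟩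
    rw [PySem.List.pyGetD_map_pyRange_of_nonneg _ _ _ _ hj hlt]
    simp only [pvG]
    rw [if_pos hcond, hcell]
  · have hnone : PySem.List.pyGet? (List.map (fun c => if PySem.List.pyGetD d[rN] c "" == "@" then (1:Int) else 0)
      (PySem.List.pyRange 0 ((PySem.List.pyGetD d 0 []).length : Int) 1)) j = none := by
      rw [PySem.List.pyGet?_eq_none_iff]
      simp [PySem.Raise.InRange, PySem.List.length_pyRange_one]
      omega
    rw [PySem.List.pyGetD_of_none _ _ _ hnone]
    simp only [pvG]
    rw [if_neg (by omega)]

theorem pvH_out (d : List (List String)) (r c : Int) (h : r < 0 ∨ (d.length : Int) ≤ r) :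
    pvH d r c = 0 := by
  simp only [pvH, pvG]
  rw [if_neg (by omega), if_neg (by omega), if_neg (by omega)]
  ring

theorem ind_get (d : List (List String)) (rN cN : Nat) (hr : rN < d.length) :
    PySem.List.pyGetD (PySem.List.pyGetD (List.map (fun row => List.map (fun c => if PySem.List.pyGetD row c "" == "@" then (1:Int) else 0) (PySem.List.pyRange 0 ((PySem.List.pyGetD d 0 []).length : Int) 1)) d) (↑rN) []) (↑cN) 0 = pvG d ↑rN ↑cN := by
  simp only [pv_getD_map _ _ _ _ hr]
  exact s_get d rN hr (↑cN) (by positivity)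

theorem h_get (d : List (List String)) (rN cN : Nat) (hr : rN < d.length)
    (hc : cN < (PySem.List.pyGetD d 0 []).length) :
    PySem.List.pyGetD (PySem.List.pyGetD (List.map (fun s => List.map (fun c => (if 0 < c then PySem.List.pyGetD s (c - 1) 0 else 0) + PySem.List.pyGetD s c 0 + (if c + 1 < ((PySem.List.pyGetD d 0 []).length : Int) then PySem.List.pyGetD s (c + 1) 0 else 0)) (PySem.List.pyRange 0 ((PySem.List.pyGetD d 0 []).length : Int) 1)) (List.map (fun row => List.map (fun c => if PySem.List.pyGetD row c "" == "@" then (1:Int) else 0) (PySem.List.pyRange 0 ((PySem.List.pyGetD d 0 []).length : Int) 1)) d)) (↑rN) []) (↑cN) 0 = pvH d ↑rN ↑cN := by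
  have hr' : rN < (List.map (fun row => List.map (fun c => if PySem.List.pyGetD row c "" == "@" then (1:Int) else 0) (PySem.List.pyRange 0 ((PySem.List.pyGetD d 0 []).length : Int) 1)) d).length := by simpa
  simp only [pv_getD_map _ _ _ _ hr']
  rw [PySem.List.pyGetD_map_pyRange _ _ _ _ hc]
  simp only [List.getElem_map]
  have h1 : (if 0 < (cN:Int) then PySem.List.pyGetD ((fun row => List.map (fun c => if PySem.List.pyGetD row c "" == "@" then (1:Int) else 0) (PySem.List.pyRange 0 ((PySem.List.pyGetD d 0 []).length : Int) 1)) d[rN]) ((cN:Int) - 1) 0 else 0)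
      = pvG d ↑rN ((cN:Int) - 1) := by
    by_cases h0 : 0 < (cN:Int)
    · rw [if_pos h0]; exact s_get d rN hr _ (by omega)
    · rw [if_neg h0]
      simp only [pvG]
      rw [if_neg (by omega)]
  have h2 : PySem.List.pyGetD ((fun row => List.map (fun c => if PySem.List.pyGetD row c "" == "@" then (1:Int) else 0) (PySem.List.pyRange 0 ((PySem.List.pyGetD d 0 []).length : Int) 1)) d[rN]) (↑cN) 0 = pvG d ↑rN ↑cN :=
    s_get d rN hr _ (by positivity)
  have h3 : (if (cN:Int) + 1 < ((PySem.List.pyGetD d 0 []).length : Int) then PySem.List.pyGetD ((fun row => List.map (fun c => if PySem.List.pyGetD row c "" == "@" then (1:Int) else 0) (PySem.List.pyRange 0 ((PySem.List.pyGetD d 0 []).length : Int) 1)) d[rN]) ((cN:Int) + 1) 0 else 0)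
      = pvG d ↑rN ((cN:Int) + 1) := by
    by_cases h0 : (cN:Int) + 1 < ((PySem.List.pyGetD d 0 []).length : Int)
    · rw [if_pos h0]; exact s_get d rN hr _ (by omega)
    · rw [if_neg h0]
      simp only [pvG]
      rw [if_neg (by omega)]
  simp only [h1, h2, h3]
  rfl

theorem above_get (d : List (List String)) (rN cN : Nat) (hr : rN < d.length)
    (hc : cN < (PySem.List.pyGetD d 0 []).length) :
    PySem.List.pyGetD (if 0 < (rN:Int) then PySem.List.pyGetD (List.map (fun s => List.map (fun c => (if 0 < c then PySem.List.pyGetD s (c - 1) 0 else 0) + PySem.List.pyGetD s c 0 + (if c + 1 < ((PySem.List.pyGetD d 0 []).length : Int) then PySem.List.pyGetD s (c + 1) 0 else 0)) (PySem.List.pyRange 0 ((PySem.List.pyGetD d 0 []).length : Int) 1)) (List.map (fun row => List.map (fun c => if PySem.List.pyGetD row c "" == "@" then (1:Int) else 0) (PySem.List.pyRange 0 ((PySem.List.pyGetD d 0 []).length : Int) 1)) d)) ((rN:Int) - 1) []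
        else List.replicate (((PySem.List.pyGetD d 0 []).length : Int)).toNat 0) (↑cN) 0 = pvH d ((rN:Int) - 1) ↑cN := by
  by_cases h0 : 0 < (rN:Int)
  · rw [if_pos h0]
    have e : (rN:Int) - 1 = ((rN - 1 : Nat) : Int) := by omega
    rw [e]
    exact h_get d (rN - 1) cN (by omega) hc
  · rw [if_neg h0, zeros_get, pvH_out]
    omega

theorem below_get (d : List (List String)) (rN cN : Nat) (hr : rN < d.length)
    (hc : cN < (PySem.List.pyGetD d 0 []).length) :
    PySem.List.pyGetD (if (rN:Int) + 1 < (d.length : Int) then PySem.List.pyGetD (List.map (fun s => List.map (fun c => (if 0 < c then PySem.List.pyGetD s (c - 1) 0 else 0) + PySem.List.pyGetD s c 0 + (if c + 1 < ((PySem.List.pyGetD d 0 []).length : Int) then PySem.List.pyGetD s (c + 1) 0 else 0)) (PySem.List.pyRange 0 ((PySem.List.pyGetD d 0 []).length : Int) 1)) (List.map (fun row => List.map (fun c => if PySem.List.pyGetD row c "" == "@" then (1:Int) else 0) (PySem.List.pyRange 0 ((PySem.List.pyGetD d 0 []).length : Int) 1)) d)) ((rN:Int) + 1) []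
        else List.replicate (((PySem.List.pyGetD d 0 []).length : Int)).toNat 0) (↑cN) 0 = pvH d ((rN:Int) + 1) ↑cN := by
  by_cases h0 : (rN:Int) + 1 < (d.length : Int)
  · rw [if_pos h0]
    have e : (rN:Int) + 1 = ((rN + 1 : Nat) : Int) := by omega
    rw [e]
    exact h_get d (rN + 1) cN (by omega) hc
  · rw [if_neg h0, zeros_get, pvH_out]
    omega

-- ===== VERDICT =====
theorem count_accessible_spec : Claim_equal_count_accessible := by
  intro d hdom hpre
  unfold Spec_count_accessible count_accessible count_accessible_alt
  rw [PySem.List.enumerate_eq_map_pyRange d ([] : List String)]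
  simp only [PySem.List.len_eq]
  rw [List.foldl_map]
  apply PySem.List.foldl_congr_mem
  intro acc r hrmem
  rw [PySem.List.mem_pyRange_one] at hrmem
  obtain ⟨rN, rfl⟩ := Int.eq_ofNat_of_zero_le hrmem.1
  have hr : rN < d.length := by exact_mod_cast hrmem.2
  simp only []
  apply PySem.List.foldl_congr_mem
  intro acc2 c hcmem
  rw [PySem.List.mem_pyRange_one] at hcmem
  obtain ⟨cN, rfl⟩ := Int.eq_ofNat_of_zero_le hcmem.1
  have hc : cN < (PySem.List.pyGetD d 0 []).length := by exact_mod_cast hcmem.2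
  rw [can_eq, above_get d rN cN hr hc, h_get d rN cN hr hc, below_get d rN cN hr hc,
    ind_get d rN cN hr]
  have hsum : pvH d ((rN:Int) - 1) ↑cN + pvH d ↑rN ↑cN + pvH d ((rN:Int) + 1) ↑cN - pvG d ↑rN ↑cN
      = pvA8 d ↑rN ↑cN := by
    simp only [pvH, pvA8]; ring
  rw [hsum]
  by_cases h1 : PySem.List.pyGetD (PySem.List.pyGetD d (↑rN) []) (↑cN) "" = "."
  · simp [pvCell]
  · by_cases h2 : pvA8 d ↑rN ↑cN < 4 <;> simp [pvCell, h2]
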